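-- pv_equiv track=rewrite | github.com/KarolGryc/advent-of-code-2025 | day-06/main.py | executeColumn
-- ===== SOURCE A (Python) =====
-- def executeColumn(inp, n):
--     i = 0
--     nums = []
--     x = inp[i][n]
--     while x != '*' and x != '+':
--         nums.append(int(x))
--         i += 1
--         x = inp[i][n]
--
--     if x == '*':
--         res = 1
--         for n in nums:
--             res *= n
--
--         return res
--
--     elif x == '+':
--         return sum(nums)
-- ===== SOURCE B (Python) =====
-- def executeColumn(inp, n):
--     s, p = 0, 1
--     for row in inp:
--         x = row[n]
--         if x == '*':
--             return p
--         if x == '+':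
--             return s
--         d = int(x)
--         s += d
--         p *= d
-- ===== Notes on version B (the rewrite author's own statement) =====
-- stated objective: simpler
-- what changed: Single forward pass over the rows maintaining running sum and product accumulators, returning the right one at the operator, instead of collecting a list of digits and aggregating it in a second loop.
import Mathlib
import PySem

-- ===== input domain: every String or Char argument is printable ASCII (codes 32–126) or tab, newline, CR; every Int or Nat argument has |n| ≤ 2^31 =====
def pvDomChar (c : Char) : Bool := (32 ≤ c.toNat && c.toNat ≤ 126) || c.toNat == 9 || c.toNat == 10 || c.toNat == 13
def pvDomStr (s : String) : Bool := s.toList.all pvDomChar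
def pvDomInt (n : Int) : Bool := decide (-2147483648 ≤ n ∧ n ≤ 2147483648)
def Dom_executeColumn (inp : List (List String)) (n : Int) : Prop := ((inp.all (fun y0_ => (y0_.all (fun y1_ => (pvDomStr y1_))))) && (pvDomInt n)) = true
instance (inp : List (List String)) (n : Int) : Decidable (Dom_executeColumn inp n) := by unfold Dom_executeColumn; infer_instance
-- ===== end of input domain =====

-- B replaces A's collect-then-aggregate (digit list + separate product/sum loop) by a single
-- pass over the rows keeping running sum and product accumulators; objective: simpler.


-- ===== PORT A =====
-- inp[i][n] (IndexError → none, handled by Pre_)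
def pvColA (inp : List (List String)) (n : Int) (i : Nat) : Option String :=
  match PySem.List.pyGet? inp (i : Int) with
  | none => none
  | some row => PySem.List.pyGet? row n

-- the while loop: collect nums until x is '*' or '+', then aggregate as A does.
-- fuel counts remaining loop steps (started at inp.length + 1, enough since i only grows);
-- the `0` defaults sit exactly where Python A raises (excluded by Pre_).
def pvGoA (inp : List (List String)) (nIdx : Int) : Nat → Nat → List Int → Int
  | 0, _, _ => 0
  | fuel + 1, i, nums =>
    match pvColA inp nIdx i with
    | none => 0
    | some x =>
      if x ≠ "*" ∧ x ≠ "+" then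
        match PySem.Int.ofStr? x with
        | none => 0
        | some d => pvGoA inp nIdx fuel (i + 1) (nums ++ [d])
      else if x = "*" then nums.foldl (· * ·) 1
      else nums.sum

def executeColumn (inp : List (List String)) (n : Int) : Int :=
  pvGoA inp n (inp.length + 1) 0 []

-- ===== PORT B =====
-- single pass down the rows with running sum s and product p
def pvGoB (nIdx : Int) : List (List String) → Int → Int → Int
  | [], _, _ => 0
  | row :: rest, s, p =>
    match PySem.List.pyGet? row nIdx with
    | none => 0
    | some x =>
      if x = "*" then p
      else if x = "+" then s
      else
        match PySem.Int.ofStr? x with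
        | none => 0
        | some d => pvGoB nIdx rest (s + d) (p * d)

def executeColumn_alt (inp : List (List String)) (n : Int) : Int :=
  pvGoB n inp 0 1

-- ===== PRECONDITION & SPEC =====
-- Pre_: exactly the inputs on which Python A returns normally — some row i holds the
-- operator '*' or '+' at column n, and every row before it holds an int()-parsable
-- string there (otherwise A raises IndexError or ValueError).
def Pre_executeColumn (inp : List (List String)) (n : Int) : Prop :=
  ∃ i ∈ List.range inp.length,
    ((inp[i]?).bind (fun row => PySem.List.pyGet? row n) = some "*" ∨
     (inp[i]?).bind (fun row => PySem.List.pyGet? row n) = some "+") ∧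
    ∀ j ∈ List.range i, ∃ x,
      (inp[j]?).bind (fun row => PySem.List.pyGet? row n) = some x ∧
      x ≠ "*" ∧ x ≠ "+" ∧ (PySem.Int.ofStr? x).isSome
instance (inp : List (List String)) (n : Int) : Decidable (Pre_executeColumn inp n) := by
  unfold Pre_executeColumn; infer_instance

def pvWitness_executeColumn : List (List String) × Int := ([["2"], ["3"], ["+"]], 0)

def Spec_executeColumn (inp : List (List String)) (n : Int) (out : Int) : Prop := out = executeColumn_alt inp n
instance (inp : List (List String)) (n : Int) (out : Int) : Decidable (Spec_executeColumn inp n out) := by unfold Spec_executeColumn; infer_instance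

-- ===== CLAIM (what is proved, stated in full; the proofs are below) =====
def Claim_equal_executeColumn : Prop := ∀ (inp : List (List String)) (n : Int), Dom_executeColumn inp n → Pre_executeColumn inp n → Spec_executeColumn inp n (executeColumn inp n)

-- ===== LEMMAS AND PROOFS =====

-- Loop correspondence: with enough fuel, A's loop from row i with collected digits nums
-- computes the same value as B's pass over the remaining rows carrying nums's sum/product.
theorem pvGoA_eq_pvGoB (inp : List (List String)) (nIdx : Int) :
    ∀ (fuel i : Nat) (nums : List Int), inp.length - i < fuel →
      pvGoA inp nIdx fuel i nums =
        pvGoB nIdx (inp.drop i) (nums.sum) (nums.foldl (· * ·) 1) := by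
  intro fuel
  induction fuel with
  | zero => intro i nums h; omega
  | succ fuel ih =>
    intro i nums h
    by_cases hi : i < inp.length
    · have hdrop : inp.drop i = inp[i] :: inp.drop (i + 1) :=
        List.drop_eq_getElem_cons hi
      have hcol : pvColA inp nIdx i = PySem.List.pyGet? inp[i] nIdx := by
        simp [pvColA, hi]
      rw [hdrop]
      simp only [pvGoA, pvGoB, hcol]
      cases hx : PySem.List.pyGet? inp[i] nIdx with
      | none => rfl
      | some x =>
        by_cases hstar : x = "*"
        · simp [hstar]
        · by_cases hplus : x = "+"
          · simp [hplus]
          · simp only [hstar, hplus, ne_eq, not_false_iff, and_self, if_true, if_false]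
            cases hd : PySem.Int.ofStr? x with
            | none => rfl
            | some d =>
              simp [ih (i + 1) (nums ++ [d]) (by omega), List.foldl_append]
    · have hdrop : inp.drop i = [] := List.drop_eq_nil_of_le (by omega)
      have hcol : pvColA inp nIdx i = none := by
        simp [pvColA, PySem.List.pyGet?_natCast, List.getElem?_eq_none (by omega : inp.length ≤ i)]
      rw [hdrop]
      simp [pvGoA, pvGoB, hcol]

-- ===== VERDICT (by name: the statement is the Claim_ definition above) =====
theorem executeColumn_spec : Claim_equal_executeColumn := by
  intro inp n _ _
  unfold Spec_executeColumn executeColumn executeColumn_alt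
  rw [pvGoA_eq_pvGoB inp n (inp.length + 1) 0 [] (by omega)]
  simp
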